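-- pv_equiv track=rewrite | github.com/HaymayndzUltra/Labs-test2 | upwork_automation/proposal_generator.py | _adjust_length_to_bounds
-- ===== SOURCE A (Python) =====
-- from typing import Dict, Any, List, Tuple
--
-- def _word_count(text: str) -> int:
--     return len([w for w in text.split() if w.strip()])
--
-- def _adjust_length_to_bounds(text: str, min_w: int = 140, max_w: int = 220) -> str:
--     words = _word_count(text)
--     if words < min_w:
--         # Expand by adding a concise clarifier sentence referencing alignment and acceptance criteria.
--         filler = (
--             " I’ll keep commits small, share quick previews, and confirm acceptance criteria per deliverable so review is fast."
--         )
--         while words < min_w: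
--             text += filler
--             words = _word_count(text)
--         return text
--     if words > max_w:
--         # Compress by removing the second sentence from the longest section except CTA
--         sections = text.split("\n\n")
--         new_sections: List[str] = []
--         for i, sec in enumerate(sections):
--             if "Call to Action:" in sec:
--                 new_sections.append(sec)
--                 continue
--             sentences = [s.strip() for s in sec.split(".") if s.strip()]
--             if len(sentences) > 1:
--                 sentences = [sentences[0]] + sentences[2:]
--             new_sections.append(". ".join(sentences).strip())
--         text = "\n\n".join(new_sections)
--         # If still long, hard trim to last max_w words while preserving CTA
--         words = _word_count(text)
--         if words > max_w:
--             parts = text.split("\n\n")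
--             cta = [p for p in parts if "Call to Action:" in p]
--             others = [p for p in parts if "Call to Action:" not in p]
--             merged = "\n\n".join(others)
--             tokens = merged.split()
--             merged = " ".join(tokens[: max_w - 50]).strip()
--             text = (merged + "\n\n" + cta[0]).strip()
--         return text
--     return text
-- ===== SOURCE B (Python) =====
-- FILLER = " I’ll keep commits small, share quick previews, and confirm acceptance criteria per deliverable so review is fast."
--
--
-- def _word_count(text: str) -> int:
--     return len([w for w in text.split() if w.strip()])
--
--
-- def _shorten_section(sec: str) -> str:
--     if "Call to Action:" in sec:
--         return sec
--     sentences = [s.strip() for s in sec.split(".") if s.strip()]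
--     if len(sentences) > 1:
--         sentences = [sentences[0]] + sentences[2:]
--     return ". ".join(sentences).strip()
--
--
-- def _adjust_length_to_bounds(text: str, min_w: int = 140, max_w: int = 220) -> str:
--     words = _word_count(text)
--     if words < min_w:
--         # each FILLER copy adds exactly 17 words: append the whole deficit at once
--         reps = -((words - min_w) // 17)  # = ceil((min_w - words) / 17)
--         return text + FILLER * reps
--     if words <= max_w:
--         return text
--     text = "\n\n".join(_shorten_section(sec) for sec in text.split("\n\n"))
--     if _word_count(text) > max_w:
--         parts = text.split("\n\n")
--         cta = next(p for p in parts if "Call to Action:" in p)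
--         merged = "\n\n".join(p for p in parts if "Call to Action:" not in p)
--         merged = " ".join(merged.split()[: max_w - 50]).strip()
--         text = (merged + "\n\n" + cta).strip()
--     return text
-- ===== Notes on version B (the rewrite author's own statement) =====
-- stated objective: faster
-- what changed: The expand branch computes the needed number of filler copies with one ceiling division and appends them all at once (A re-splits the whole grown text after every single append); the compression pass becomes a map with a section helper and next() replaces building a cta list and indexing it.
import Mathlib
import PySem

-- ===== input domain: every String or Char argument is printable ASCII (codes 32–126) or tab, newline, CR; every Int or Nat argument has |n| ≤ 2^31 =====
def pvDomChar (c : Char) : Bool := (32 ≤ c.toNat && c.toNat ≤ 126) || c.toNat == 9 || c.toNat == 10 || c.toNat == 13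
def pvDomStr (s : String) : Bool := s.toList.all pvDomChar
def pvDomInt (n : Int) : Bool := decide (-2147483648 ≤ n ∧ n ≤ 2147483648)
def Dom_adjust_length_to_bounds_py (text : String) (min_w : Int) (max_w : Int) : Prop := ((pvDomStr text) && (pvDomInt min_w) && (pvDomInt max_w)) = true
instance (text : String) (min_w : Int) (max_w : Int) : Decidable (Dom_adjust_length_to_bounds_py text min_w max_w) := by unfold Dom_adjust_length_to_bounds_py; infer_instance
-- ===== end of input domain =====

-- B replaces A's quadratic append-and-recount expansion loop by one ceiling division and a single
-- bulk append, and restructures the compression pass (map with a helper, find-first instead of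
-- filter-then-index); measured faster on the large expand inputs.

-- Shared module helper _word_count (identical in Source A and Source B): len([w for w in text.split() if w.strip()])
def word_count_py (text : String) : Int :=
  (((PySem.Str.split₀ text).filter (fun w => PySem.Str.strip w != "")).length : Int)

-- exact port of Python's s.split(sep) for a NONEMPTY literal sep (PySem.Chars.splitOn is exactly that)
def pvSplitSep (s sep : String) : List String :=
  (PySem.Chars.splitOn s.toList sep.toList).map String.ofList

-- the filler sentence appended by the expand branch (17 words)
def pvFiller : String := " I’ll keep commits small, share quick previews, and confirm acceptance criteria per deliverable so review is fast."

-- pvFiller without its leading space, as a char list (used by the word-count lemma)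
def pvFillerTail : List Char := "I’ll keep commits small, share quick previews, and confirm acceptance criteria per deliverable so review is fast.".toList

-- ===== lemmas the ports need (termination of A's while loop), cited in decreasing_by =====

theorem pv_go_acc (s : List Char) : ∀ (cur : List Char) (acc : List (List Char)),
    PySem.Chars.split₀.go s cur acc = acc.reverse ++ PySem.Chars.split₀.go s cur [] := by
  induction s with
  | nil =>
    intro cur acc
    simp only [PySem.Chars.split₀.go]
    split <;> simp
  | cons c rest ih =>
    intro cur acc
    simp only [PySem.Chars.split₀.go]
    split
    · split
      · exact ih [] acc
      · rw [ih [] (cur.reverse :: acc), ih [] [cur.reverse]]; simp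
    · exact ih (c :: cur) acc

theorem pv_go_append (c : Char) (hc : PySem.Chars.isspace c = true) (u s : List Char) :
    ∀ (cur : List Char) (acc : List (List Char)),
      PySem.Chars.split₀.go (s ++ c :: u) cur acc =
        PySem.Chars.split₀.go s cur acc ++ PySem.Chars.split₀.go u [] [] := by
  induction s with
  | nil =>
    intro cur acc
    have h1 := pv_go_acc u [] acc
    have h2 := pv_go_acc u [] (cur.reverse :: acc)
    simp only [List.nil_append, PySem.Chars.split₀.go, hc, if_true, h1, h2]
    split <;> simp
  | cons a s ih =>
    intro cur acc
    simp only [List.cons_append, PySem.Chars.split₀.go]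
    split
    · split <;> exact ih _ _
    · exact ih _ _

theorem pv_split₀_append (c : Char) (hc : PySem.Chars.isspace c = true) (s u : List Char) :
    PySem.Chars.split₀ (s ++ c :: u) = PySem.Chars.split₀ s ++ PySem.Chars.split₀ u := by
  simp only [PySem.Chars.split₀]
  exact pv_go_append c hc u s [] []

set_option maxRecDepth 100000 in
theorem pv_filler_toList : pvFiller.toList = ' ' :: pvFillerTail := by decide

set_option maxRecDepth 100000 in
theorem pv_wc_filler (t : String) : word_count_py (t ++ pvFiller) = word_count_py t + 17 := by
  simp only [word_count_py, PySem.Str.split₀, String.toList_append, pv_filler_toList,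
    pv_split₀_append ' ' (by decide) t.toList pvFillerTail, List.map_append, List.filter_append,
    List.length_append]
  have h17 : (((PySem.Chars.split₀ pvFillerTail).map String.ofList).filter
      (fun w => PySem.Str.strip w != "")).length = 17 := by decide
  rw [h17]
  push_cast
  ring

-- ===== PORT A =====
-- the while-loop of the expand branch: while words < min_w: text += filler; words = _word_count(text)
def expand_loop_py (text : String) (min_w : Int) : String :=
  if word_count_py text < min_w then expand_loop_py (text ++ pvFiller) min_w else text
termination_by (min_w - word_count_py text).toNat
decreasing_by rw [pv_wc_filler]; omega

-- the enumerate index i of A's for-loop is never used, so the fold carries only new_sections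
def adjust_length_to_bounds_py (text : String) (min_w : Int) (max_w : Int) : String :=
  let words := word_count_py text
  if words < min_w then
    expand_loop_py text min_w
  else if words > max_w then
    let sections := pvSplitSep text "\n\n"
    let new_sections := sections.foldl (fun acc sec =>
      if PySem.Str.isIn "Call to Action:" sec then acc ++ [sec]
      else
        let sentences := ((pvSplitSep sec ".").map PySem.Str.strip).filter (fun s => s != "")
        let sentences := if sentences.length > 1 then [sentences.headD ""] ++ sentences.drop 2 else sentences
        acc ++ [PySem.Str.strip (PySem.Str.join ". " sentences)]) []
    let text2 := PySem.Str.join "\n\n" new_sections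
    let words2 := word_count_py text2
    if words2 > max_w then
      let parts := pvSplitSep text2 "\n\n"
      let cta := parts.filter (fun p => PySem.Str.isIn "Call to Action:" p)
      let others := parts.filter (fun p => !PySem.Str.isIn "Call to Action:" p)
      let merged := PySem.Str.join "\n\n" others
      let tokens := PySem.Str.split₀ merged
      let merged2 := PySem.Str.strip (PySem.Str.join " " (PySem.List.slice tokens none (some (max_w - 50))))
      -- cta[0] raises IndexError when cta = []; exactly those inputs are outside Pre_ (port returns "" there)
      PySem.Str.strip (merged2 ++ "\n\n" ++ (PySem.List.pyGet? cta 0).getD "")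
    else text2
  else text

-- ===== PORT B =====
def shorten_section_alt (sec : String) : String :=
  if PySem.Str.isIn "Call to Action:" sec then sec
  else
    let sentences := ((pvSplitSep sec ".").map PySem.Str.strip).filter (fun s => s != "")
    let sentences := if sentences.length > 1 then [sentences.headD ""] ++ sentences.drop 2 else sentences
    PySem.Str.strip (PySem.Str.join ". " sentences)

-- Source B's "\n\n".join(_shorten_section(sec) for sec in text.split("\n\n"))
def pvCompress (text : String) : String :=
  PySem.Str.join "\n\n" ((pvSplitSep text "\n\n").map shorten_section_alt)

-- Python's s * n on strings (n ≤ 0 gives "")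
def py_str_mul (s : String) (n : Int) : String :=
  (List.replicate n.toNat s).foldl (· ++ ·) ""

def adjust_length_to_bounds_py_alt (text : String) (min_w : Int) (max_w : Int) : String :=
  let words := word_count_py text
  if words < min_w then
    let reps := -(PySem.Int.floordiv (words - min_w) 17)
    text ++ py_str_mul pvFiller reps
  else if words ≤ max_w then text
  else
    let text2 := pvCompress text
    if word_count_py text2 > max_w then
      let parts := pvSplitSep text2 "\n\n"
      -- next(p for p in parts if "Call to Action:" in p); raises when absent: outside Pre_ (port returns "")
      let cta := (parts.find? (fun p => PySem.Str.isIn "Call to Action:" p)).getD ""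
      let merged := PySem.Str.join "\n\n" (parts.filter (fun p => !PySem.Str.isIn "Call to Action:" p))
      let merged2 := PySem.Str.strip (PySem.Str.join " " (PySem.List.slice (PySem.Str.split₀ merged) none (some (max_w - 50))))
      PySem.Str.strip (merged2 ++ "\n\n" ++ cta)
    else text2

-- ===== PRECONDITION & SPEC =====
-- Pre_ excludes exactly the inputs on which A raises (and B raises too): a text of at least min_w
-- and more than max_w words, with no "Call to Action:" marker, that is STILL over max_w words after
-- the sentence-removal compression — there A's cta[0] hits an empty list (IndexError) and B's
-- next() raises likewise.
def Pre_adjust_length_to_bounds_py (text : String) (min_w : Int) (max_w : Int) : Prop :=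
  word_count_py text < min_w ∨ word_count_py text ≤ max_w ∨
    PySem.Str.isIn "Call to Action:" text = true ∨ word_count_py (pvCompress text) ≤ max_w
instance (text : String) (min_w : Int) (max_w : Int) : Decidable (Pre_adjust_length_to_bounds_py text min_w max_w) := by unfold Pre_adjust_length_to_bounds_py; infer_instance

def pvWitness_adjust_length_to_bounds_py : String × Int × Int := ("hello world", 0, 5)

def Spec_adjust_length_to_bounds_py (text : String) (min_w : Int) (max_w : Int) (out : String) : Prop := out = adjust_length_to_bounds_py_alt text min_w max_w
instance (text : String) (min_w : Int) (max_w : Int) (out : String) : Decidable (Spec_adjust_length_to_bounds_py text min_w max_w out) := by unfold Spec_adjust_length_to_bounds_py; infer_instance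

-- ===== CLAIM (what is proved, stated in full; the proofs are below) =====
def Claim_equal_adjust_length_to_bounds_py : Prop := ∀ (text : String) (min_w : Int) (max_w : Int), Dom_adjust_length_to_bounds_py text min_w max_w → Pre_adjust_length_to_bounds_py text min_w max_w → Spec_adjust_length_to_bounds_py text min_w max_w (adjust_length_to_bounds_py text min_w max_w)

-- ===== LEMMAS AND PROOFS =====

theorem pv_foldl_append_str (l : List String) (a : String) :
    l.foldl (· ++ ·) a = a ++ l.foldl (· ++ ·) "" := by
  induction l generalizing a with
  | nil => simp
  | cons x l ih => simp only [List.foldl_cons]; rw [ih (a ++ x), ih ("" ++ x)]; simp [String.append_assoc]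

theorem pv_mul_succ (s : String) (n : Nat) :
    (List.replicate (n + 1) s).foldl (· ++ ·) "" = s ++ (List.replicate n s).foldl (· ++ ·) "" := by
  rw [List.replicate_succ, List.foldl_cons, pv_foldl_append_str]
  simp

theorem pv_expand_eq (m : Int) (t : String) :
    expand_loop_py t m = t ++ py_str_mul pvFiller (-(PySem.Int.floordiv (word_count_py t - m) 17)) := by
  generalize hn : (m - word_count_py t).toNat = n
  induction n using Nat.strong_induction_on generalizing t with
  | _ n ih =>
    rw [expand_loop_py]
    rw [PySem.Int.floordiv_eq_ediv_of_pos (by norm_num : (0:Int) < 17)]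
    by_cases h : word_count_py t < m
    · rw [if_pos h]
      rw [ih ((m - word_count_py (t ++ pvFiller)).toNat) (by rw [pv_wc_filler]; omega) (t ++ pvFiller) rfl]
      rw [pv_wc_filler, PySem.Int.floordiv_eq_ediv_of_pos (by norm_num : (0:Int) < 17)]
      have harith : (-((word_count_py t - m) / 17)).toNat = (-((word_count_py t + 17 - m) / 17)).toNat + 1 := by
        omega
      rw [py_str_mul, py_str_mul, harith, pv_mul_succ, ← String.append_assoc]
    · rw [if_neg h]
      have h0 : (-((word_count_py t - m) / 17)).toNat = 0 := by omega
      rw [py_str_mul, h0]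
      simp

theorem pv_fold_eq_map (sections : List String) :
    sections.foldl (fun acc sec =>
      if PySem.Str.isIn "Call to Action:" sec then acc ++ [sec]
      else
        let sentences := ((pvSplitSep sec ".").map PySem.Str.strip).filter (fun s => s != "")
        let sentences := if sentences.length > 1 then [sentences.headD ""] ++ sentences.drop 2 else sentences
        acc ++ [PySem.Str.strip (PySem.Str.join ". " sentences)]) [] =
    sections.map shorten_section_alt := by
  have hbody : (fun (acc : List String) sec =>
      if PySem.Str.isIn "Call to Action:" sec then acc ++ [sec]
      else
        let sentences := ((pvSplitSep sec ".").map PySem.Str.strip).filter (fun s => s != "")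
        let sentences := if sentences.length > 1 then [sentences.headD ""] ++ sentences.drop 2 else sentences
        acc ++ [PySem.Str.strip (PySem.Str.join ". " sentences)]) =
      (fun acc sec => acc ++ [shorten_section_alt sec]) := by
    funext acc sec
    by_cases h : PySem.Str.isIn "Call to Action:" sec = true
    · rw [if_pos h]; unfold shorten_section_alt; rw [if_pos h]
    · rw [if_neg h]; unfold shorten_section_alt; rw [if_neg h]
  rw [hbody, PySem.List.foldl_append_singleton_eq_map]
  simp

theorem pv_cta_eq (parts : List String) :
    (PySem.List.pyGet? (parts.filter (fun p => PySem.Str.isIn "Call to Action:" p)) 0).getD "" =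
    (parts.find? (fun p => PySem.Str.isIn "Call to Action:" p)).getD "" := by
  rw [PySem.List.pyGet?_ofNat', ← List.head?_eq_getElem?, List.head?_filter]

-- ===== VERDICT (by name: the statement is the Claim_ definition above) =====
set_option maxHeartbeats 4000000 in
theorem adjust_length_to_bounds_py_spec : Claim_equal_adjust_length_to_bounds_py := by
  intro text min_w max_w _ _
  unfold Spec_adjust_length_to_bounds_py
  simp only [adjust_length_to_bounds_py, adjust_length_to_bounds_py_alt, pv_expand_eq,
    pv_fold_eq_map, pv_cta_eq, pvCompress]
  by_cases h1 : word_count_py text < min_w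
  · rw [if_pos h1, if_pos h1]
  · by_cases h2 : word_count_py text > max_w
    · have h2' : ¬ word_count_py text ≤ max_w := by omega
      rw [if_neg h1, if_neg h1, if_pos h2, if_neg h2']
    · have h2' : word_count_py text ≤ max_w := by omega
      rw [if_neg h1, if_neg h1, if_neg h2, if_pos h2']
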